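-- pv_equiv track=rewrite | github.com/Twiggecode/Integer-Sequences | Collatz Conjecture/Collatz_Conjecture.py | isToOneRec
-- ===== SOURCE A (Python) =====
-- def isToOneRec(n: int, s: set) -> bool:
--     if n == 1:
--         return True
--
--     # If there is a cycle formed,
--     # we can't reach 1.
--     if n in s:
--         return False
--
--     # If n is odd then pass n = 3n+1 else n = n/2
--     if n % 2:
--         return isToOneRec(3 * n + 1, s)
--     else:
--         return isToOneRec(n // 2, s)
-- ===== SOURCE B (Python) =====
-- def _done(n, s):
--     # Terminal test: reached 1, or revisited a value recorded in s (cycle).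
--     return n == 1 or n in s
--
-- def _step(n):
--     # One Collatz step: halve even n, 3n+1 for odd n.
--     return n // 2 if n % 2 == 0 else 3 * n + 1
--
-- def isToOneRec(n, s):
--     # Iterative driver over a terminal-test / step-function decomposition.
--     while not _done(n, s):
--         n = _step(n)
--     return n == 1
-- ===== Notes on version B (the rewrite author's own statement) =====
-- stated objective: simpler
-- what changed: The tail recursion with three inline returns is decomposed into a terminal-test helper _done and a step-function helper _step driven by a plain iterative while-loop; the answer is read off n == 1 after the loop, so no recursion (hence no RecursionError) is involved.
-- outside the precondition, e.g. on isToOneRec(-4, {-2}): A returns False, B returns False; on isToOneRec(0, set()): A raises RecursionError, B does not finish within the time limit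
import Mathlib
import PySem

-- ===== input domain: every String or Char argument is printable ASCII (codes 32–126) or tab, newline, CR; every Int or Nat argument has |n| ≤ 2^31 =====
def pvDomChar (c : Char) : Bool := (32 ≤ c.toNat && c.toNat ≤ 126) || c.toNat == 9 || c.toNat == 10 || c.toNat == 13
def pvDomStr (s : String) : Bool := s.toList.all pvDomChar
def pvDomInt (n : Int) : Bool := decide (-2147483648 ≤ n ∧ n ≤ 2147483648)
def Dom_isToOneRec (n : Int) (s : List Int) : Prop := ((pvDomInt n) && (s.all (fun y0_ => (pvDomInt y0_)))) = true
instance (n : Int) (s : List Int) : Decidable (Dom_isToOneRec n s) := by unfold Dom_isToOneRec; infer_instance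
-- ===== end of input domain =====

-- B decomposes A's tail recursion into a terminal-test helper and a step-function helper
-- driven by a plain iterative loop; same work per step, no recursion, simpler control flow.


-- ===== PORT A =====
-- A's recursion does not structurally terminate (s never grows), so the port carries a fuel
-- guard; 20001 steps exceed every Collatz trajectory length reachable inside Dom, so the
-- guard never fires on inputs where the Python returns.
def isToOneRecF (s : List Int) : Nat → Int → Bool
  | 0, _ => false
  | fuel + 1, n =>
    if n = 1 then true
    else if n ∈ s then false
    else if PySem.Int.mod n 2 ≠ 0 then isToOneRecF s fuel (3 * n + 1)
    else isToOneRecF s fuel (PySem.Int.floordiv n 2)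

def isToOneRec (n : Int) (s : List Int) : Bool := isToOneRecF s 20001 n

-- ===== PORT B =====
-- def _done(n, s): return n == 1 or n in s
def pvDone (n : Int) (s : List Int) : Bool := n == 1 || s.contains n

-- def _step(n): return n // 2 if n % 2 == 0 else 3 * n + 1
def pvStep (n : Int) : Int :=
  if PySem.Int.mod n 2 = 0 then PySem.Int.floordiv n 2 else 3 * n + 1

-- while not _done(n, s): n = _step(n)   (fuel-guarded; returns the final n)
def pvRun (s : List Int) : Nat → Int → Int
  | 0, n => n
  | fuel + 1, n => if !pvDone n s then pvRun s fuel (pvStep n) else n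

def isToOneRec_alt (n : Int) (s : List Int) : Bool := pvRun s 20000 n == 1

-- ===== PRECONDITION & SPEC =====
-- Pre_ excludes nonpositive n not in s: there the trajectory never reaches 1, so A recurses
-- until Python raises RecursionError (and B loops), except on the few inputs whose trajectory
-- still meets s, where both programs return the same False.
def Pre_isToOneRec (n : Int) (s : List Int) : Prop := 1 ≤ n ∨ n ∈ s
instance (n : Int) (s : List Int) : Decidable (Pre_isToOneRec n s) := by unfold Pre_isToOneRec; infer_instance
def pvWitness_isToOneRec : Int × List Int := (6, [10, 7])

def Spec_isToOneRec (n : Int) (s : List Int) (out : Bool) : Prop := out = isToOneRec_alt n s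
instance (n : Int) (s : List Int) (out : Bool) : Decidable (Spec_isToOneRec n s out) := by unfold Spec_isToOneRec; infer_instance

-- ===== CLAIM (what is proved, stated in full; the proofs are below) =====
def Claim_equal_isToOneRec : Prop := ∀ (n : Int) (s : List Int), Dom_isToOneRec n s → Pre_isToOneRec n s → Spec_isToOneRec n s (isToOneRec n s)

-- ===== LEMMAS AND PROOFS =====
-- A with fuel+1 equals B's loop with fuel, for every fuel (each consumes one unit per Collatz step).
theorem isToOneRecF_eq_run (s : List Int) (fuel : Nat) (n : Int) :
    isToOneRecF s (fuel + 1) n = (pvRun s fuel n == 1) := by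
  induction fuel generalizing n with
  | zero =>
    simp only [isToOneRecF, pvRun]
    by_cases h1 : n = 1
    · simp [h1]
    · by_cases h2 : n ∈ s <;> simp [h1, h2]
  | succ fuel ih =>
    rw [isToOneRecF, pvRun]
    by_cases h1 : n = 1
    · simp [pvDone, h1]
    · by_cases h2 : n ∈ s
      · simp [pvDone, h1, h2]
      · have hd : (!pvDone n s) = true := by simp [pvDone, h1, h2]
        rw [if_neg h1, if_neg h2, if_pos hd]
        by_cases h3 : PySem.Int.mod n 2 = 0
        · rw [if_neg (by simpa using h3), pvStep, if_pos h3]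
          exact ih (PySem.Int.floordiv n 2)
        · rw [if_pos h3, pvStep, if_neg h3]
          exact ih (3 * n + 1)

-- ===== VERDICT (by name: the statement is the Claim_ definition above) =====
theorem isToOneRec_spec : Claim_equal_isToOneRec := by
  intro n s _ _
  unfold Spec_isToOneRec isToOneRec isToOneRec_alt
  exact isToOneRecF_eq_run s 20000 n
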